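-- pv_equiv track=rewrite | github.com/RedCatAFK/autopep | autopep/modal/autopep_agent/demo_pipeline.py | _select_pdb_id
-- ===== SOURCE A (Python) =====
-- from typing import Any, Mapping
--
-- TARGET_PDB_ID = "6LU7"
--
-- def _select_pdb_id(pdb_search: Mapping[str, Any]) -> str:
--     identifiers = [
--         str(row.get("identifier"))
--         for row in pdb_search.get("results", [])
--         if isinstance(row, Mapping) and row.get("identifier")
--     ]
--     if TARGET_PDB_ID in identifiers:
--         return TARGET_PDB_ID
--     if identifiers:
--         return identifiers[0]
--     return TARGET_PDB_ID
-- ===== SOURCE B (Python) =====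
-- from typing import Any, Mapping
--
-- TARGET_PDB_ID = "6LU7"
--
-- def _select_pdb_id(pdb_search: Mapping[str, Any]) -> str:
--     # Keyed selection: rank every valid identifier by (is-not-target, position)
--     # and pick the minimum; the target (if present) wins, else the earliest row.
--     keyed = [
--         ((sid != TARGET_PDB_ID, i), sid)
--         for i, row in enumerate(pdb_search.get("results", []))
--         if isinstance(row, Mapping) and row.get("identifier")
--         for sid in [str(row.get("identifier"))]
--     ]
--     return min(keyed, default=((False, -1), TARGET_PDB_ID))[1]
-- ===== Notes on version B (the rewrite author's own statement) =====
-- stated objective: alternative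
-- what changed: B recasts the selection as an argmin: it ranks each valid identifier by the key (is-not-target, position) and returns the minimum-keyed one (default target), replacing A's build-list / membership-test / head-element staging.
import Mathlib
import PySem

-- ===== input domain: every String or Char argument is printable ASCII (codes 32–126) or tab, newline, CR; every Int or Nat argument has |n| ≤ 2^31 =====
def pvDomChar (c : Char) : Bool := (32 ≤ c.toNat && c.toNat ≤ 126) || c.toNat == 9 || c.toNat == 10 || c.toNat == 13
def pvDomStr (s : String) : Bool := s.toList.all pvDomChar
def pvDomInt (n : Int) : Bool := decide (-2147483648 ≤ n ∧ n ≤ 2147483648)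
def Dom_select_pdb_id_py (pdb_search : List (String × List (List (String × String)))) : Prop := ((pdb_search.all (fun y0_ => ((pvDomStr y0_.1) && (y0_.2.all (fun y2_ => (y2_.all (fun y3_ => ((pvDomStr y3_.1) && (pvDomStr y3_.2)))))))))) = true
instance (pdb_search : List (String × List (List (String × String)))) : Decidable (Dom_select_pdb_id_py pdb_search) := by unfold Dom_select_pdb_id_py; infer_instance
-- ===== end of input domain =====

-- B selects by a keyed minimum (rank (is-not-target, position), pick the argmin, default target) instead of A's build-list / membership-test / head staging; alternative algorithm, same cost.


-- ===== PORT A =====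
-- dict.get(k, default) on an association list: first match (Python dicts have unique keys)
def pvLookup {ν : Type} (d : List (String × ν)) (k : String) : Option ν :=
  (d.find? (fun p => p.1 == k)).map (·.2)

-- str(row.get("identifier")) kept when row.get("identifier") is truthy (a non-empty string);
-- isinstance(row, Mapping) is always true under the type convention (rows are dicts).
def pvPick (row : List (String × String)) : Option String :=
  match pvLookup row "identifier" with
  | some s => if s ≠ "" then some s else none
  | none => none

def select_pdb_id_py (pdb_search : List (String × List (List (String × String)))) : String :=
  let identifiers := ((pvLookup pdb_search "results").getD []).filterMap pvPick
  if "6LU7" ∈ identifiers then "6LU7"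
  else match identifiers with
    | i :: _ => i
    | [] => "6LU7"

-- ===== PORT B =====
-- the keyed comprehension: ((sid != TARGET, i), sid) for each valid row, i the enumerate index
def pvKeyed : Nat → List (List (String × String)) → List ((Bool × Nat) × String)
  | _, [] => []
  | i, r :: rs =>
    match pvPick r with
    | some s => ((s != "6LU7", i), s) :: pvKeyed (i + 1) rs
    | none => pvKeyed (i + 1) rs

-- Python tuple-< on the (bool, int) keys (False < True, then the index)
def pvKeyLt (k1 k2 : Bool × Nat) : Bool :=
  (!k1.1 && k2.1) || (k1.1 == k2.1 && decide (k1.2 < k2.2))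

-- Python min: first minimal element, left fold keeping the accumulator on ties
def pvMinRun (acc : (Bool × Nat) × String) : List ((Bool × Nat) × String) → (Bool × Nat) × String
  | [] => acc
  | x :: xs => pvMinRun (if pvKeyLt x.1 acc.1 then x else acc) xs

def select_pdb_id_py_alt (pdb_search : List (String × List (List (String × String)))) : String :=
  match pvKeyed 0 ((pvLookup pdb_search "results").getD []) with
  | [] => "6LU7"          -- min's default, second component
  | x :: xs => (pvMinRun x xs).2

-- ===== PRECONDITION & SPEC =====
def Spec_select_pdb_id_py (pdb_search : List (String × List (List (String × String)))) (out : String) : Prop := out = select_pdb_id_py_alt pdb_search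
instance (pdb_search : List (String × List (List (String × String)))) (out : String) : Decidable (Spec_select_pdb_id_py pdb_search out) := by unfold Spec_select_pdb_id_py; infer_instance

-- ===== CLAIM (what is proved, stated in full; the proofs are below) =====
def Claim_equal_select_pdb_id_py : Prop := ∀ (pdb_search : List (String × List (List (String × String)))), Dom_select_pdb_id_py pdb_search → Spec_select_pdb_id_py pdb_search (select_pdb_id_py pdb_search)

-- ===== LEMMAS AND PROOFS =====

lemma pvMinRun_spec (rows : List (List (String × String))) :
    ∀ (i : Nat) (acc : (Bool × Nat) × String), acc.1.2 < i → acc.1.1 = (acc.2 != "6LU7") →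
      (pvMinRun acc (pvKeyed i rows)).2 =
        if acc.1.1 then (if "6LU7" ∈ rows.filterMap pvPick then "6LU7" else acc.2) else acc.2 := by
  induction rows with
  | nil =>
    intro i acc _ _
    simp [pvKeyed, pvMinRun]
  | cons r rs ih =>
    intro i acc hidx hacc
    cases h : pvPick r with
    | none =>
      simpa [pvKeyed, h] using ih (i + 1) acc (by omega) hacc
    | some s =>
      by_cases hb : acc.1.1 = true
      · -- acc is already the target class: nothing ever replaces it
        have hni : ¬ (i < acc.1.2) := by omega
        by_cases hst : s = "6LU7"
        · subst hst
          have hlt : pvKeyLt ((false : Bool), i) acc.1 = true := by simp [pvKeyLt, hb]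
          have hrec := ih (i + 1) (((false : Bool), i), "6LU7") (Nat.lt_succ_self i) (by simp)
          simp only at hrec
          simp [pvKeyed, h, pvMinRun, hlt, hrec, hb]
        · have hlt : pvKeyLt ((s != "6LU7" : Bool), i) acc.1 = false := by
            simp [pvKeyLt, bne_iff_ne, hst, hb, hni]
          have hrec := ih (i + 1) acc (by omega) hacc
          simp [pvKeyed, h, pvMinRun, hlt, hrec, hb, Ne.symm hst]
      · -- acc.2 = "6LU7": nothing with a later index can beat it
        have hb' : acc.1.1 = false := by cases hcc : acc.1.1 <;> simp_all
        have hni : ¬ (i < acc.1.2) := by omega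
        have hlt : pvKeyLt ((s != "6LU7" : Bool), i) acc.1 = false := by
          by_cases hst : s = "6LU7" <;> simp [pvKeyLt, hb', hst, hni]
        have hrec := ih (i + 1) acc (by omega) hacc
        simp [pvKeyed, h, pvMinRun, hlt, hrec, hb']

lemma pvKeyed_select (rows : List (List (String × String))) :
    ∀ (i : Nat),
      (match pvKeyed i rows with
        | [] => "6LU7"
        | x :: xs => (pvMinRun x xs).2) =
      (if "6LU7" ∈ rows.filterMap pvPick then "6LU7"
       else match rows.filterMap pvPick with
         | c :: _ => c
         | [] => "6LU7") := by
  induction rows with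
  | nil => intro i; simp [pvKeyed]
  | cons r rs ih =>
    intro i
    cases h : pvPick r with
    | none => simpa [pvKeyed, h] using ih (i + 1)
    | some s =>
      have hmr := pvMinRun_spec rs (i + 1) (((s != "6LU7" : Bool), i), s) (Nat.lt_succ_self i) rfl
      by_cases hst : s = "6LU7"
      · subst hst
        simp only [bne_self_eq_false] at hmr
        simp [pvKeyed, h, hmr]
      · have hb : (s != "6LU7") = true := by simp [bne_iff_ne, hst]
        simp only [hb] at hmr
        simp only [pvKeyed, h, hb]
        rw [hmr]
        simp [h, Ne.symm hst]

-- ===== VERDICT (by name: the statement is the Claim_ definition above) =====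
theorem select_pdb_id_py_spec : Claim_equal_select_pdb_id_py := by
  intro pdb_search _
  unfold Spec_select_pdb_id_py select_pdb_id_py select_pdb_id_py_alt
  rw [pvKeyed_select]
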